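-- pv_equiv track=rewrite | github.com/Hanna3011/Advent_of_code | day7_part2.py | create_content_path_dicts
-- ===== SOURCE A (Python) =====
-- def create_content_path_dicts(
--         input_list):  # fukcja zwraca 2 słowniki, każdy folder zawiera swój numer, w jednym słowniku numer zawiera wartość ścieżki folderu w postaci kolejnych nadfolderów na liście, a w drugim wartością jest lista zawartości
--     path = []
--     content = []
--     n_line = 0  # numer linii (pozycji na liście z wejściowymi danymi)
--     folder_content_dict = {}
--     path_number = 1  # nadawanie numeru ścieżce jako klucza do słowników
--     path_number_dict = {}
--     for line in input_list:
--         if line[0:4] == "$ cd":  # sprawdzam, czy dana linia mówi o zmianie lokalizacji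
--             if line[
--                5:] == "..":  # jeśli linia cofa nas o folder do tyłu, odejmuję ze ścieżki ostatni element, czyli nazwę folderu, który opuszczam
--                 del path[-1]
--             else:  # jeśli linia oznacza wejście do folderu, dodaję do ścieżki nazwę folderu, do którego wchodzę
--                 path.append(line[5:])
--         elif line[
--              0:4] == "$ ls":  # przy natknięciu się na tę komendę, dla aktualnej ścieżki w kolejnych liniach wyświetli się zawartość
--             for line_after_ls in input_list[
--                                  n_line + 1:]:  # iteruję po kolejnych liniach po $ ls dopóki nie natknę się na komendę cd lub ls
--                 if line_after_ls[
--                    0:4] == "$ cd":  # jeśli napotkam komendę cd, oznacza to, że uzupełniana lista zawartości folderu jest kompletna (zakończyło się wymienianie elementów)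
--                     path_number_dict[
--                         path_number] = path.copy()  # kopiuję zawartość ścieżki jako wartość dla numeru ścieżki do słownika path_number_dict
--                     folder_content_dict[
--                         path_number] = content.copy()  # analogicznie jak wyżej wypełniam drugi słownik - dla numeru ścieżki przypisuję wartość zawartości jako listy
--                     path_number += 1  # ponieważ kończę akcję dla tej ścieżki, zakładam numer zwiększony o jeden dla kolejnej
--                     content = []  # zeruję listę dla zawartości
--                     break
--                 else:
--                     content.append(
--                         line_after_ls)  # kolejne wymienione elementy dokładam do zawartości folderu o danej liczbie
--         n_line += 1  # zwiększam numer linii dla kolejnej analizowanej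
--     path_number_dict[path_number] = path.copy()
--     folder_content_dict[path_number] = content.copy()
--     return folder_content_dict, path_number_dict
-- ===== SOURCE B (Python) =====
-- def create_content_path_dicts(input_list):
--     # Single forward pass: a "$ ls" starts collecting the current directory's
--     # listing; the listing is flushed (numbered, with a copy of the current path)
--     # as soon as the next command line arrives, and once more at the end of input.
--     path = []
--     content = []
--     listing = False
--     folder_content_dict = {}
--     path_number_dict = {}
--     path_number = 1
--     for line in input_list:
--         if line[0:4] == "$ cd":
--             if listing:
--                 folder_content_dict[path_number] = content
--                 path_number_dict[path_number] = list(path)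
--                 path_number += 1
--                 content = []
--                 listing = False
--             if line[5:] == "..":
--                 path.pop()
--             else:
--                 path.append(line[5:])
--         elif line[0:4] == "$ ls":
--             if listing:
--                 folder_content_dict[path_number] = content
--                 path_number_dict[path_number] = list(path)
--                 path_number += 1
--                 content = []
--             listing = True
--         else:
--             if listing:
--                 content.append(line)
--     folder_content_dict[path_number] = content
--     path_number_dict[path_number] = list(path)
--     return folder_content_dict, path_number_dict
-- ===== Notes on version B (the rewrite author's own statement) =====
-- stated objective: alternative
-- what changed: A re-slices and re-scans the rest of the input at every '$ ls' line; B is a single forward pass with a listing state flag that collects content lines and flushes the numbered entry at the next command line. Pre_ excludes only inputs where both programs raise IndexError ('$ cd ..' with an empty path).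
-- intended difference: On inputs with two '$ ls' lines not separated by a '$ cd' line, A's content entries include the later '$ ls' command line itself (and, at end of input, concatenate the overlapping listings into one entry), while B records each listing separately with command lines excluded, which is the intended parse of the terminal transcript. — e.g. on create_content_path_dicts(["$ ls", "$ ls"]): A returns ([(1, ["$ ls"])], [(1, [])]), B returns ([(1, []), (2, [])], [(1, []), (2, [])])
import Mathlib
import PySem

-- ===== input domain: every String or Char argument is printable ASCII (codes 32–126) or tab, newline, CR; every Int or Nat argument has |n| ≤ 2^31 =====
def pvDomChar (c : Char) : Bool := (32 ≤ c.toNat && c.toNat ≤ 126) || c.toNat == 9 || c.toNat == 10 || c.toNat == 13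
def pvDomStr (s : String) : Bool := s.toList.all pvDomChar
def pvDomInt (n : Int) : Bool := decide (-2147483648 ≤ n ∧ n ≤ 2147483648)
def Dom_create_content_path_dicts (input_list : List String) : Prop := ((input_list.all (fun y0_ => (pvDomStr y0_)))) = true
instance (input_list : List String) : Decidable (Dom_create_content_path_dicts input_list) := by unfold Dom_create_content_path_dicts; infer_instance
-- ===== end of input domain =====

-- B replaces A's re-scan of the remaining input at every "$ ls" line by a single forward
-- pass with a listing flag that flushes the collected entry at the next command line;
-- objective: alternative. Outside D_ the results are proved equal; inside D_ (two "$ ls"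
-- with no "$ cd" between them) B's parse is the intended one (see the sentence at D_).
-- Equivalence is about the RETURN value only (neither Python mutates its argument).

-- ===== PORT A =====
-- line[0:4] == "$ cd" / "$ ls"  (PySem.List.slice is Python's slice, exact)
def pvIsCd (l : String) : Bool := PySem.List.slice l.toList (some 0) (some 4) == ['$', ' ', 'c', 'd']

def pvIsLs (l : String) : Bool := PySem.List.slice l.toList (some 0) (some 4) == ['$', ' ', 'l', 's']

-- line[5:] == ".."
def pvIsUp (l : String) : Bool := PySem.List.slice l.toList (some 5) none == ['.', '.']

-- line[5:] as the folder-name string appended to path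
def pvArg (l : String) : String := String.ofList (PySem.List.slice l.toList (some 5) none)

-- A's inner `for line_after_ls in input_list[n_line+1:]` loop: appends lines to content
-- until a "$ cd" line; the Bool records whether the break (= the flush) happened.
def pvLsScan : List String → List String → List String × Bool
  | [], content => (content, false)
  | l :: rest, content =>
      if pvIsCd l then (content, true) else pvLsScan rest (content ++ [l])

-- A's outer loop; state = (path, content, folder_content_dict, path_number, path_number_dict).
-- `del path[-1]` is List.dropLast: exact when path ≠ [] (Python raises IndexError on [],
-- excluded by Pre_).
def pvLoopA (all : List String) :
    List String → Nat →
    (List String × List String × PySem.Dict Int (List String) × Int × PySem.Dict Int (List String)) →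
    (List String × List String × PySem.Dict Int (List String) × Int × PySem.Dict Int (List String))
  | [], _, s => s
  | line :: rest, n, (path, content, fdict, pn, pdict) =>
      if pvIsCd line then
        if pvIsUp line then
          pvLoopA all rest (n + 1) (path.dropLast, content, fdict, pn, pdict)
        else
          pvLoopA all rest (n + 1) (path ++ [pvArg line], content, fdict, pn, pdict)
      else if pvIsLs line then
        match pvLsScan (all.drop (n + 1)) content with
        | (c, true)  => pvLoopA all rest (n + 1) (path, [], fdict.insert pn c, pn + 1, pdict.insert pn path)
        | (c, false) => pvLoopA all rest (n + 1) (path, c, fdict, pn, pdict)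
      else pvLoopA all rest (n + 1) (path, content, fdict, pn, pdict)

-- the two final dict assignments and the return (folder_content_dict, path_number_dict)
def pvFinA :
    (List String × List String × PySem.Dict Int (List String) × Int × PySem.Dict Int (List String)) →
    (List (Int × List String)) × (List (Int × List String))
  | (path, content, fdict, pn, pdict) =>
      ((fdict.insert pn content).items, (pdict.insert pn path).items)

def create_content_path_dicts (input_list : List String) : (List (Int × List String)) × (List (Int × List String)) :=
  pvFinA (pvLoopA input_list input_list 0 ([], [], PySem.Dict.empty, 1, PySem.Dict.empty))

-- ===== PORT B =====
-- Source B's flush: folder_content_dict[pn] = content; path_number_dict[pn] = list(path); pn += 1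
def pvFlushB (path content : List String)
    (st : PySem.Dict Int (List String) × PySem.Dict Int (List String) × Int) :
    PySem.Dict Int (List String) × PySem.Dict Int (List String) × Int :=
  (st.1.insert st.2.2 content, st.2.1.insert st.2.2 path, st.2.2 + 1)

-- Source B's single pass; state = (path, listing, content, folder_content_dict, path_number,
-- path_number_dict).  `path.pop()` is List.dropLast (IndexError on [], excluded by Pre_).
def pvLoopB :
    List String →
    (List String × Bool × List String × PySem.Dict Int (List String) × Int × PySem.Dict Int (List String)) →
    (List String × Bool × List String × PySem.Dict Int (List String) × Int × PySem.Dict Int (List String))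
  | [], s => s
  | line :: rest, (path, listing, content, f, pn, d) =>
      if pvIsCd line then
        let st := if listing then pvFlushB path content (f, d, pn) else (f, d, pn)
        pvLoopB rest ((if pvIsUp line then path.dropLast else path ++ [pvArg line]),
          false, (if listing then [] else content), st.1, st.2.2, st.2.1)
      else if pvIsLs line then
        let st := if listing then pvFlushB path content (f, d, pn) else (f, d, pn)
        pvLoopB rest (path, true, (if listing then [] else content), st.1, st.2.2, st.2.1)
      else
        pvLoopB rest (path, listing, (if listing then content ++ [line] else content), f, pn, d)

-- the final flush and the return pair
def pvFinB :
    (List String × Bool × List String × PySem.Dict Int (List String) × Int × PySem.Dict Int (List String)) →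
    (List (Int × List String)) × (List (Int × List String))
  | (path, _, content, f, pn, d) =>
      ((f.insert pn content).items, (d.insert pn path).items)

def create_content_path_dicts_alt (input_list : List String) : (List (Int × List String)) × (List (Int × List String)) :=
  pvFinB (pvLoopB input_list ([], false, [], PySem.Dict.empty, 1, PySem.Dict.empty))

-- ===== PRECONDITION & SPEC =====
-- Pre_ excludes exactly the inputs where both Pythons raise IndexError: a "$ cd .." line
-- executed with an empty path (some prefix has more "$ cd .." than other "$ cd" lines).
def Pre_create_content_path_dicts (input_list : List String) : Prop :=
  ∀ k < input_list.length + 1,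
    (input_list.take k).countP (fun l => pvIsCd l && pvIsUp l) ≤
    (input_list.take k).countP (fun l => pvIsCd l && !pvIsUp l)
instance (input_list : List String) : Decidable (Pre_create_content_path_dicts input_list) := by
  unfold Pre_create_content_path_dicts; infer_instance

def pvWitness_create_content_path_dicts : List String :=
  ["$ cd /", "$ ls", "1234 a.txt", "dir e", "$ cd e", "$ ls", "99 f", "$ cd .."]

-- On inputs with two "$ ls" lines not separated by a "$ cd" line, A's content entries
-- include the later "$ ls" command line itself (and, at end of input, concatenate the
-- overlapping listings into one entry), while B records each listing separately with
-- command lines excluded, which is the intended parse of the terminal transcript.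
def D_create_content_path_dicts (input_list : List String) : Prop :=
  ∃ i < input_list.length, ∃ j < input_list.length, i < j ∧
    pvIsLs (input_list.getD i "") = true ∧ pvIsLs (input_list.getD j "") = true ∧
    ∀ k, k < j → i < k → pvIsCd (input_list.getD k "") = false
instance (input_list : List String) : Decidable (D_create_content_path_dicts input_list) := by
  unfold D_create_content_path_dicts; infer_instance

def Spec_create_content_path_dicts (input_list : List String) (out : (List (Int × List String)) × (List (Int × List String))) : Prop := ¬ D_create_content_path_dicts input_list → out = create_content_path_dicts_alt input_list
instance (input_list : List String) (out : (List (Int × List String)) × (List (Int × List String))) : Decidable (Spec_create_content_path_dicts input_list out) := by unfold Spec_create_content_path_dicts; infer_instance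

def pvDiffWitness_create_content_path_dicts : List String := ["$ ls", "$ ls"]

def pvDiffWitnessOut_create_content_path_dicts :
    ((List (Int × List String)) × (List (Int × List String))) × ((List (Int × List String)) × (List (Int × List String))) :=
  (([(1, ["$ ls"])], [(1, [])]), ([(1, []), (2, [])], [(1, []), (2, [])]))

-- ===== CLAIM (what is proved, stated in full; the proofs are below) =====
def Claim_unchanged_create_content_path_dicts : Prop := ∀ (input_list : List String), Dom_create_content_path_dicts input_list → Pre_create_content_path_dicts input_list → Spec_create_content_path_dicts input_list (create_content_path_dicts input_list)
def Claim_changed_create_content_path_dicts : Prop := Dom_create_content_path_dicts (pvDiffWitness_create_content_path_dicts) ∧ Pre_create_content_path_dicts (pvDiffWitness_create_content_path_dicts) ∧ D_create_content_path_dicts (pvDiffWitness_create_content_path_dicts) ∧ create_content_path_dicts (pvDiffWitness_create_content_path_dicts) = pvDiffWitnessOut_create_content_path_dicts.1 ∧ create_content_path_dicts_alt (pvDiffWitness_create_content_path_dicts) = pvDiffWitnessOut_create_content_path_dicts.2 ∧ pvDiffWitnessOut_create_content_path_dicts.1 ≠ pvDiffWitnessOut_create_content_path_dicts.2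

-- ===== LEMMAS AND PROOFS =====

-- the content lists A flushes in a "$ cd"-free block: one per "$ ls" line, holding all
-- block lines strictly after it
def pvSegs : List String → List (List String)
  | [] => []
  | l :: rest => if pvIsLs l then rest :: pvSegs rest else pvSegs rest

-- A's flush of a list of pending content lists at a "$ cd"
def pvFlush (path : List String) (opens : List (List String))
    (st : PySem.Dict Int (List String) × PySem.Dict Int (List String) × Int) :
    PySem.Dict Int (List String) × PySem.Dict Int (List String) × Int :=
  opens.foldl (fun st c => (st.1.insert st.2.2 c, st.2.1.insert st.2.2 path, st.2.2 + 1)) st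

-- B's view of a "$ cd"-free block with at most one "$ ls": whether it has one, and the
-- lines strictly after it
def pvHasLs (blk : List String) : Bool := blk.any pvIsLs
def pvSeg (blk : List String) : List String := (blk.dropWhile (fun x => !pvIsLs x)).tail

theorem pvLoopA_nil (all : List String) (n : Nat) (s) : pvLoopA all [] n s = s := rfl

theorem pvLoopA_cons (all : List String) (line : String) (rest : List String) (n : Nat)
    (path content : List String) (f : PySem.Dict Int (List String)) (pn : Int)
    (d : PySem.Dict Int (List String)) :
    pvLoopA all (line :: rest) n (path, content, f, pn, d) =
      if pvIsCd line then
        if pvIsUp line then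
          pvLoopA all rest (n + 1) (path.dropLast, content, f, pn, d)
        else
          pvLoopA all rest (n + 1) (path ++ [pvArg line], content, f, pn, d)
      else if pvIsLs line then
        match pvLsScan (all.drop (n + 1)) content with
        | (c, true)  => pvLoopA all rest (n + 1) (path, [], f.insert pn c, pn + 1, d.insert pn path)
        | (c, false) => pvLoopA all rest (n + 1) (path, c, f, pn, d)
      else pvLoopA all rest (n + 1) (path, content, f, pn, d) := rfl

theorem pvLoopB_nil (s) : pvLoopB [] s = s := rfl

theorem pvLoopB_cons (line : String) (rest path : List String) (listing : Bool)
    (content : List String) (f : PySem.Dict Int (List String)) (pn : Int)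
    (d : PySem.Dict Int (List String)) :
    pvLoopB (line :: rest) (path, listing, content, f, pn, d) =
      if pvIsCd line then
        pvLoopB rest ((if pvIsUp line then path.dropLast else path ++ [pvArg line]),
          false, (if listing then [] else content),
          (if listing then pvFlushB path content (f, d, pn) else (f, d, pn)).1,
          (if listing then pvFlushB path content (f, d, pn) else (f, d, pn)).2.2,
          (if listing then pvFlushB path content (f, d, pn) else (f, d, pn)).2.1)
      else if pvIsLs line then
        pvLoopB rest (path, true, (if listing then [] else content),
          (if listing then pvFlushB path content (f, d, pn) else (f, d, pn)).1,
          (if listing then pvFlushB path content (f, d, pn) else (f, d, pn)).2.2,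
          (if listing then pvFlushB path content (f, d, pn) else (f, d, pn)).2.1)
      else
        pvLoopB rest (path, listing, (if listing then content ++ [line] else content), f, pn, d) := rfl

theorem pvDropWhile_head {p : String → Bool} {l : List String} {a : String} {t : List String}
    (h : l.dropWhile p = a :: t) : p a = false := by
  have hne : l.dropWhile p ≠ [] := by simp [h]
  have h2 := List.head_dropWhile_not p hne
  have h3 : (l.dropWhile p).head hne = a := by
    rw [List.head_eq_iff_head?_eq_some, h]
    rfl
  rw [h3] at h2
  exact h2

theorem pvLsScan_no_cd (xs : List String) (c : List String)
    (h : ∀ x ∈ xs, pvIsCd x = false) : pvLsScan xs c = (c ++ xs, false) := by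
  induction xs generalizing c with
  | nil => simp [pvLsScan]
  | cons x xs ih =>
      have hx := h x (by simp)
      rw [pvLsScan, if_neg (by simp [hx]), ih _ (fun y hy => h y (by simp [hy]))]
      simp

theorem pvLsScan_cd (xs : List String) (l : String) (rest : List String) (c : List String)
    (h : ∀ x ∈ xs, pvIsCd x = false) (hl : pvIsCd l = true) :
    pvLsScan (xs ++ l :: rest) c = (c ++ xs, true) := by
  induction xs generalizing c with
  | nil => simp [pvLsScan, hl]
  | cons x xs ih =>
      have hx := h x (by simp)
      rw [List.cons_append, pvLsScan, if_neg (by simp [hx]),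
        ih _ (fun y hy => h y (by simp [hy]))]
      simp

-- A over a trailing cd-free block: content accumulates the segments, nothing else moves
theorem pvLoopA_tail (blk : List String) (all : List String) :
    ∀ (n : Nat) (path c : List String) f (pn : Int) d,
    (∀ x ∈ blk, pvIsCd x = false) → all.drop n = blk →
    pvLoopA all blk n (path, c, f, pn, d) = (path, c ++ (pvSegs blk).flatten, f, pn, d) := by
  induction blk with
  | nil => intro n path c f pn d _ _; rw [pvLoopA_nil]; simp [pvSegs]
  | cons x xs ih =>
      intro n path c f pn d hfree hdrop
      have hx : pvIsCd x = false := hfree x (by simp)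
      have hdrop' : all.drop (n + 1) = xs := by rw [← List.tail_drop, hdrop]; rfl
      have hfree' : ∀ y ∈ xs, pvIsCd y = false := fun y hy => hfree y (by simp [hy])
      rw [pvLoopA_cons, if_neg (by simp [hx])]
      by_cases hls : pvIsLs x = true
      · rw [if_pos hls, hdrop', pvLsScan_no_cd xs c hfree']
        show pvLoopA all xs (n + 1) (path, c ++ xs, f, pn, d) = _
        rw [ih (n + 1) path (c ++ xs) f pn d hfree' hdrop']
        simp [pvSegs, hls]
      · have hls' : pvIsLs x = false := by revert hls; cases pvIsLs x <;> simp
        rw [if_neg (by simp [hls']), ih (n + 1) path c f pn d hfree' hdrop']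
        simp [pvSegs, hls']

-- A over a cd-free block followed by a "$ cd" line: each "$ ls" flushes immediately,
-- producing exactly pvFlush over the block's segments
theorem pvLoopA_block (blk : List String) (all : List String) (l : String) (rest : List String) :
    ∀ (n : Nat) (path : List String) f (pn : Int) d,
    (∀ x ∈ blk, pvIsCd x = false) → pvIsCd l = true → all.drop n = blk ++ l :: rest →
    pvLoopA all (blk ++ l :: rest) n (path, [], f, pn, d) =
      pvLoopA all (l :: rest) (n + blk.length)
        (path, [], (pvFlush path (pvSegs blk) (f, d, pn)).1,
          (pvFlush path (pvSegs blk) (f, d, pn)).2.2,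
          (pvFlush path (pvSegs blk) (f, d, pn)).2.1) := by
  induction blk with
  | nil => intro n path f pn d _ _ _; rfl
  | cons x xs ih =>
      intro n path f pn d hfree hl hdrop
      have hx : pvIsCd x = false := hfree x (by simp)
      have hdrop' : all.drop (n + 1) = xs ++ l :: rest := by
        rw [← List.tail_drop, hdrop]; rfl
      have hfree' : ∀ y ∈ xs, pvIsCd y = false := fun y hy => hfree y (by simp [hy])
      rw [List.cons_append, pvLoopA_cons, if_neg (by simp [hx])]
      by_cases hls : pvIsLs x = true
      · rw [if_pos hls, hdrop', pvLsScan_cd xs l rest [] hfree' hl]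
        show pvLoopA all (xs ++ l :: rest) (n + 1)
            (path, [], f.insert pn ([] ++ xs), pn + 1, d.insert pn path) = _
        rw [List.nil_append,
          ih (n + 1) path (f.insert pn xs) (pn + 1) (d.insert pn path) hfree' hl hdrop']
        have hfl : pvFlush path (pvSegs (x :: xs)) (f, d, pn) =
            pvFlush path (pvSegs xs) (f.insert pn xs, d.insert pn path, pn + 1) := by
          simp [pvSegs, hls, pvFlush]
        rw [hfl]
        have hn : n + 1 + xs.length = n + (x :: xs).length := by
          simp [List.length_cons]
          omega
        rw [hn]
      · have hls' : pvIsLs x = false := by revert hls; cases pvIsLs x <;> simp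
        rw [if_neg (by simp [hls']), ih (n + 1) path f pn d hfree' hl hdrop']
        have hseg : pvSegs (x :: xs) = pvSegs xs := by simp [pvSegs, hls']
        rw [hseg]
        have hn : n + 1 + xs.length = n + (x :: xs).length := by
          simp [List.length_cons]
          omega
        rw [hn]

-- B over a run of plain file lines while listing: they are appended to content in order
theorem pvLoopB_files (ys : List String) :
    ∀ (t path c : List String) f (pn : Int) d,
    (∀ x ∈ ys, pvIsCd x = false ∧ pvIsLs x = false) →
    pvLoopB (ys ++ t) (path, true, c, f, pn, d) = pvLoopB t (path, true, c ++ ys, f, pn, d) := by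
  induction ys with
  | nil => intro t path c f pn d _; simp
  | cons y ys ih =>
      intro t path c f pn d h
      obtain ⟨hcd, hls⟩ := h y (by simp)
      rw [List.cons_append, pvLoopB_cons, if_neg (by simp [hcd]), if_neg (by simp [hls])]
      rw [if_pos rfl, ih t path (c ++ [y]) f pn d (fun x hx => h x (by simp [hx]))]
      simp

theorem pvSegs_of_noLs (l : List String) (h : ∀ x ∈ l, pvIsLs x = false) : pvSegs l = [] := by
  induction l with
  | nil => rfl
  | cons x xs ih =>
      have := h x (by simp)
      simp [pvSegs, this, ih (fun y hy => h y (by simp [hy]))]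

theorem pvNoLs_of_count (l : List String) (h : l.countP pvIsLs = 0) :
    ∀ x ∈ l, pvIsLs x = false := by
  intro x hx
  have := List.countP_eq_zero.mp h x hx
  simpa using this

-- B over a cd-free block with at most one "$ ls", starting idle: ends with the listing
-- flag and the lines after the "$ ls" as pending content, dicts untouched
theorem pvLoopB_block (blk : List String) :
    ∀ (t path : List String) f (pn : Int) d,
    (∀ x ∈ blk, pvIsCd x = false) → blk.countP pvIsLs ≤ 1 →
    pvLoopB (blk ++ t) (path, false, [], f, pn, d) =
      pvLoopB t (path, pvHasLs blk, pvSeg blk, f, pn, d) := by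
  induction blk with
  | nil => intro t path f pn d _ _; simp [pvHasLs, pvSeg]
  | cons x xs ih =>
      intro t path f pn d hfree hcnt
      have hx : pvIsCd x = false := hfree x (by simp)
      rw [List.cons_append, pvLoopB_cons, if_neg (by simp [hx])]
      by_cases hls : pvIsLs x = true
      · rw [if_pos hls]
        have hcnt0 : xs.countP pvIsLs = 0 := by
          have := List.countP_cons_of_pos (p := pvIsLs) (a := x) (l := xs) hls
          omega
        have hno := pvNoLs_of_count xs hcnt0
        rw [show (if false = true then pvFlushB path [] (f, d, pn) else (f, d, pn)) = (f, d, pn) from rfl]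
        rw [show (if false = true then ([] : List String) else []) = [] from rfl]
        rw [pvLoopB_files xs t path [] f pn d (fun y hy => ⟨hfree y (by simp [hy]), hno y hy⟩)]
        have h1 : pvHasLs (x :: xs) = true := by simp [pvHasLs, hls]
        have h2 : pvSeg (x :: xs) = xs := by simp [pvSeg, List.dropWhile, hls]
        rw [h1, h2]
        simp
      · have hls' : pvIsLs x = false := by revert hls; cases pvIsLs x <;> simp
        rw [if_neg (by simp [hls'])]
        have hcnt' : xs.countP pvIsLs ≤ 1 := by
          have := List.countP_cons_of_neg (p := pvIsLs) (a := x) (l := xs) (by simp [hls'])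
          omega
        rw [show (if false = true then ([] : List String) ++ [x] else []) = [] from rfl]
        rw [ih t path f pn d (fun y hy => hfree y (by simp [hy])) hcnt']
        have h1 : pvHasLs (x :: xs) = pvHasLs xs := by simp [pvHasLs, hls']
        have h2 : pvSeg (x :: xs) = pvSeg xs := by simp [pvSeg, List.dropWhile, hls']
        rw [h1, h2]

theorem pvSeg_of_noLs (l : List String) (h : ∀ x ∈ l, pvIsLs x = false) : pvSeg l = [] := by
  have : l.dropWhile (fun x => !pvIsLs x) = [] := by
    rw [List.dropWhile_eq_nil_iff]
    intro x hx; simp [h x hx]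
  simp [pvSeg, this]

-- one positive countP gives an index
theorem pvExists_idx (l : List String) (h : 1 ≤ l.countP pvIsLs) :
    ∃ j, j < l.length ∧ pvIsLs (l.getD j "") = true := by
  have hpos : 0 < l.countP pvIsLs := h
  obtain ⟨y, hy, hp⟩ := List.countP_pos_iff.mp hpos
  obtain ⟨k, hk, rfl⟩ := List.mem_iff_getElem.mp hy
  exact ⟨k, hk, by rw [List.getD_eq_getElem l "" hk]; exact hp⟩

-- two "$ ls" in a cd-free list give the two indices of D_
theorem pvTwoLs (l : List String) (h : 2 ≤ l.countP pvIsLs) :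
    ∃ i j, i < j ∧ j < l.length ∧ pvIsLs (l.getD i "") = true ∧ pvIsLs (l.getD j "") = true := by
  induction l with
  | nil => rw [List.countP_nil] at h; omega
  | cons x xs ih =>
      by_cases hls : pvIsLs x = true
      · have hcnt : 1 ≤ xs.countP pvIsLs := by
          have := List.countP_cons_of_pos (p := pvIsLs) (a := x) (l := xs) hls
          omega
        obtain ⟨j, hj, hpj⟩ := pvExists_idx xs hcnt
        refine ⟨0, j + 1, by omega, by simp; omega, by simpa using hls, ?_⟩
        simpa using hpj
      · have h' : 2 ≤ xs.countP pvIsLs := by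
          have := List.countP_cons_of_neg (p := pvIsLs) (a := x) (l := xs) (by simp at hls ⊢; exact hls)
          omega
        obtain ⟨i, j, hij, hj, hpi, hpj⟩ := ih h'
        exact ⟨i + 1, j + 1, by omega, by simp; omega, by simpa using hpi, by simpa using hpj⟩

-- D_ lifts from the remainder after a "$ cd" line to the whole list
theorem pvD_extend (blk : List String) (l : String) (rest : List String)
    (h : D_create_content_path_dicts rest) :
    D_create_content_path_dicts (blk ++ l :: rest) := by
  obtain ⟨i, hi, j, hj, hij, hpi, hpj, hbet⟩ := h
  have hlen : (blk ++ l :: rest).length = blk.length + 1 + rest.length := by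
    simp [List.length_append]; omega
  have hshift : ∀ m, (blk ++ l :: rest).getD (blk.length + 1 + m) "" = rest.getD m "" := by
    intro m
    rw [List.getD_append_right _ _ _ _ (by omega)]
    have : blk.length + 1 + m - blk.length = m + 1 := by omega
    rw [this]
    simp
  refine ⟨blk.length + 1 + i, by omega, blk.length + 1 + j, by omega, by omega, ?_, ?_, ?_⟩
  · rw [hshift]; exact hpi
  · rw [hshift]; exact hpj
  · intro k hk1 hk2
    have hm : k = blk.length + 1 + (k - (blk.length + 1)) := by omega
    rw [hm, hshift]
    exact hbet _ (by omega) (by omega)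

-- two "$ ls" in the cd-free prefix give D_ of the whole list
theorem pvD_of_prefix (blk rest2 : List String)
    (hfree : ∀ x ∈ blk, pvIsCd x = false) (h : 2 ≤ blk.countP pvIsLs) :
    D_create_content_path_dicts (blk ++ rest2) := by
  obtain ⟨i, j, hij, hj, hpi, hpj⟩ := pvTwoLs blk h
  have hget : ∀ m, m < blk.length → (blk ++ rest2).getD m "" = blk.getD m "" := by
    intro m hm
    exact List.getD_append _ _ _ _ hm
  refine ⟨i, by rw [List.length_append]; omega, j, by rw [List.length_append]; omega,
    hij, ?_, ?_, ?_⟩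
  · rw [hget i (by omega)]; exact hpi
  · rw [hget j hj]; exact hpj
  · intro k hk1 hk2
    rw [hget k (by omega)]
    have hmem : blk.getD k "" ∈ blk := by
      rw [List.getD_eq_getElem blk "" (by omega)]
      exact List.getElem_mem _
    exact hfree _ hmem


theorem pvSegs_single (pre : List String) (a : String) (t : List String)
    (hpre : ∀ x ∈ pre, pvIsLs x = false) (ha : pvIsLs a = true)
    (ht : ∀ x ∈ t, pvIsLs x = false) :
    pvSegs (pre ++ a :: t) = [t] := by
  induction pre with
  | nil => simp [pvSegs, ha, pvSegs_of_noLs t ht]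
  | cons z zs ih =>
      have hz := hpre z (by simp)
      rw [List.cons_append,
        show pvSegs (z :: (zs ++ a :: t)) = pvSegs (zs ++ a :: t) by simp [pvSegs, hz]]
      exact ih (fun x hx => hpre x (by simp [hx]))

-- a list with exactly one "$ ls" splits around it; pvSeg is the part after it
theorem pvOneLs (blk : List String) (h : blk.countP pvIsLs = 1) :
    ∃ pre a t, blk = pre ++ a :: t ∧ (∀ x ∈ pre, pvIsLs x = false) ∧ pvIsLs a = true ∧
      (∀ x ∈ t, pvIsLs x = false) ∧ pvSeg blk = t := by
  cases hdw : blk.dropWhile (fun x => !pvIsLs x) with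
  | nil =>
      exfalso
      have hall := List.dropWhile_eq_nil_iff.mp hdw
      have : blk.countP pvIsLs = 0 :=
        List.countP_eq_zero.mpr (fun x hx => by simpa using hall x hx)
      omega
  | cons a t =>
      have ha : pvIsLs a = true := by
        simpa using pvDropWhile_head (p := fun x => !pvIsLs x) hdw
      refine ⟨blk.takeWhile (fun x => !pvIsLs x), a, t, ?_, ?_, ha, ?_, ?_⟩
      · rw [← hdw, List.takeWhile_append_dropWhile]
      · intro x hx; simpa using List.mem_takeWhile_imp hx
      · intro x hx
        have hc1 : blk.countP pvIsLs =
            (blk.takeWhile (fun x => !pvIsLs x)).countP pvIsLs + (a :: t).countP pvIsLs := by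
          conv_lhs => rw [← List.takeWhile_append_dropWhile (p := fun x => !pvIsLs x) (l := blk),
            hdw]
          rw [List.countP_append]
        have hc2 : (a :: t).countP pvIsLs = t.countP pvIsLs + 1 :=
          List.countP_cons_of_pos (p := pvIsLs) (a := a) (l := t) ha
        have hc3 : t.countP pvIsLs = 0 := by omega
        simpa using List.countP_eq_zero.mp hc3 x hx
      · rw [pvSeg, hdw]; simp

theorem pvSegs_eq_single (blk : List String) (h : blk.countP pvIsLs = 1) :
    pvSegs blk = [pvSeg blk] := by
  obtain ⟨pre, a, t, hdec, hpre, ha, ht, hseg⟩ := pvOneLs blk h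
  rw [hseg, hdec]
  exact pvSegs_single pre a t hpre ha ht

-- main synchronisation: from a block boundary the two loops produce the same final answer
set_option maxHeartbeats 1000000 in
theorem pvMain (N : Nat) :
    ∀ (rest all : List String) (n : Nat) (path : List String) f (pn : Int) d,
    rest.length ≤ N → all.drop n = rest → ¬ D_create_content_path_dicts rest →
    pvFinA (pvLoopA all rest n (path, [], f, pn, d)) =
      pvFinB (pvLoopB rest (path, false, [], f, pn, d)) := by
  induction N with
  | zero =>
      intro rest all n path f pn d hlen hdrop _
      have : rest = [] := List.length_eq_zero_iff.mp (Nat.le_zero.mp hlen)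
      subst this
      rw [pvLoopA_nil, pvLoopB_nil]
      simp [pvFinA, pvFinB]
  | succ N ih =>
      intro rest all n path f pn d hlen hdrop hnD
      set blk := rest.takeWhile (fun x => !pvIsCd x) with hblk
      set rest2 := rest.dropWhile (fun x => !pvIsCd x) with hrest2
      have hsplit : blk ++ rest2 = rest := List.takeWhile_append_dropWhile
      have hfree : ∀ x ∈ blk, pvIsCd x = false := by
        intro x hx
        have := List.mem_takeWhile_imp hx
        simpa using this
      have hcnt : blk.countP pvIsLs ≤ 1 := by
        by_contra hc
        exact hnD (hsplit ▸ pvD_of_prefix blk rest2 hfree (by omega))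
      cases hr2 : rest2 with
      | nil =>
          have hrb : rest = blk := by rw [← hsplit, hr2, List.append_nil]
          rw [hrb] at hdrop ⊢
          rw [pvLoopA_tail blk all n path [] f pn d hfree hdrop]
          have hB := pvLoopB_block blk [] path f pn d hfree hcnt
          rw [List.append_nil] at hB
          rw [hB, pvLoopB_nil]
          by_cases hh : pvHasLs blk = true
          · have hone : blk.countP pvIsLs = 1 := by
              have : 0 < blk.countP pvIsLs := by
                obtain ⟨y, hy, hp⟩ := List.any_eq_true.mp hh
                exact List.countP_pos_iff.mpr ⟨y, hy, hp⟩
              omega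
            have hflat : (pvSegs blk).flatten = pvSeg blk := by
              rw [pvSegs_eq_single blk hone]
              simp
            rw [hflat]
            simp [pvFinA, pvFinB]
          · have hno : ∀ x ∈ blk, pvIsLs x = false := by
              intro x hx
              by_contra hc
              simp only [Bool.not_eq_false] at hc
              exact absurd (List.any_eq_true.mpr ⟨x, hx, hc⟩) (by simpa [pvHasLs] using hh)
            rw [pvSegs_of_noLs blk hno, pvSeg_of_noLs blk hno]
            simp [pvFinA, pvFinB]
      | cons l rest' =>
          have hl : pvIsCd l = true := by
            have hdw : rest.dropWhile (fun x => !pvIsCd x) = l :: rest' := by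
              rw [← hrest2]; exact hr2
            have := pvDropWhile_head hdw
            simpa using this
          have hrb : rest = blk ++ l :: rest' := by rw [← hsplit, hr2]
          have hnD' : ¬ D_create_content_path_dicts rest' := by
            intro h
            exact hnD (hrb ▸ pvD_extend blk l rest' h)
          rw [hrb] at hdrop ⊢
          rw [pvLoopA_block blk all l rest' n path f pn d hfree hl hdrop,
            pvLoopB_block blk (l :: rest') path f pn d hfree hcnt]
          rw [pvLoopA_cons, if_pos hl, pvLoopB_cons, if_pos hl]
          have hdrop' : all.drop (n + blk.length + 1) = rest' := by
            have h1 : all.drop (n + blk.length) = (blk ++ l :: rest').drop blk.length := by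
              rw [← hdrop, List.drop_drop, Nat.add_comm]
            have h2 : (blk ++ l :: rest').drop blk.length = l :: rest' :=
              List.drop_left (l₁ := blk) (l₂ := l :: rest')
            rw [← List.tail_drop, h1, h2]; rfl
          have hlen' : rest'.length ≤ N := by
            have h1 : rest.length = blk.length + (l :: rest').length := by
              rw [hrb, List.length_append]
            simp [List.length_cons] at h1
            omega
          by_cases hh : pvHasLs blk = true
          · -- exactly one ls: A flushed [pvSeg blk] at the scan; B flushes at this cd
            have hone : blk.countP pvIsLs = 1 := by
              have : 0 < blk.countP pvIsLs := by
                obtain ⟨y, hy, hp⟩ := List.any_eq_true.mp hh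
                exact List.countP_pos_iff.mpr ⟨y, hy, hp⟩
              omega
            have hsegs : pvSegs blk = [pvSeg blk] := pvSegs_eq_single blk hone
            rw [hsegs, hh]
            by_cases hup : pvIsUp l = true
            · rw [if_pos hup, if_pos hup]
              exact ih rest' all (n + blk.length + 1) path.dropLast _ _ _ hlen' hdrop' hnD'
            · rw [if_neg hup, if_neg hup]
              exact ih rest' all (n + blk.length + 1) (path ++ [pvArg l]) _ _ _ hlen' hdrop' hnD'
          · have hno : ∀ x ∈ blk, pvIsLs x = false := by
              intro x hx
              by_contra hc
              simp only [Bool.not_eq_false] at hc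
              exact absurd (List.any_eq_true.mpr ⟨x, hx, hc⟩) (by simpa [pvHasLs] using hh)
            have hh' : pvHasLs blk = false := by revert hh; cases pvHasLs blk <;> simp
            rw [pvSegs_of_noLs blk hno, pvSeg_of_noLs blk hno, hh']
            by_cases hup : pvIsUp l = true
            · rw [if_pos hup, if_pos hup]
              exact ih rest' all (n + blk.length + 1) path.dropLast _ _ _ hlen' hdrop' hnD'
            · rw [if_neg hup, if_neg hup]
              exact ih rest' all (n + blk.length + 1) (path ++ [pvArg l]) _ _ _ hlen' hdrop' hnD'

-- ===== VERDICT (by name: the statements are the Claim_ definitions above) =====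
theorem create_content_path_dicts_spec : Claim_unchanged_create_content_path_dicts := by
  intro input_list _ _ hnD
  unfold create_content_path_dicts create_content_path_dicts_alt
  exact pvMain input_list.length input_list input_list 0 [] PySem.Dict.empty 1 PySem.Dict.empty
    (le_refl _) (by simp) hnD

theorem create_content_path_dicts_changed : Claim_changed_create_content_path_dicts := by
  unfold Claim_changed_create_content_path_dicts; decide
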